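-- pv_equiv track=rewrite | github.com/ASSERT-KTH/Mokav | experiments/pynguin/c4b/return-lst/generated_tests/src_848/2/src_848.py | func
-- ===== SOURCE A (Python) =====
-- def func(*args):
-- 	ret_values = []
--
--
-- 	def pushes_count(buttons):
-- 	    pushes_list = list(range(1, buttons))
-- 	    pushes_list.sort(reverse=True)
-- 	    counter = 0
-- 	    for i in pushes_list:
-- 	        pushes_list[counter] += (i * counter)
-- 	        counter += 1
-- 	    ret_values.append((buttons + sum(pushes_list)))
-- 	pushes_count(int(args[0]))
--
-- 	return ret_values
-- ===== SOURCE B (Python) =====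
-- def func(*args):
--     buttons = int(args[0])
--     total = (buttons * buttons * buttons - buttons) // 6 if buttons > 1 else 0
--     return [buttons + total]
-- ===== Notes on version B (the rewrite author's own statement) =====
-- stated objective: faster
-- what changed: Replaced building, reverse-sorting and mutating a list of b-1 pushes with the closed-form sum buttons + (b^3-b)/6.
import Mathlib
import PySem

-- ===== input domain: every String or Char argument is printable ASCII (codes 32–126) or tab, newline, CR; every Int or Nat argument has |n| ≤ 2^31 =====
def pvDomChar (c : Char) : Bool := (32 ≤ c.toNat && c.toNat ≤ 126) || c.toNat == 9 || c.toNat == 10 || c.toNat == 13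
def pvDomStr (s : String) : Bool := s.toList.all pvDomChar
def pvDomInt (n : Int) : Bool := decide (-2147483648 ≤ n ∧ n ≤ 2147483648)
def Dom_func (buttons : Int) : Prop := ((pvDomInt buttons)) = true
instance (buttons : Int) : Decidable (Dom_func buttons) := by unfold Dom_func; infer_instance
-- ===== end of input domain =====

-- B replaces A's build/reverse-sort/mutate loop over the list [1, .., buttons-1] with the
-- closed-form value buttons + (buttons^3 - buttons) // 6; faster (O(1) vs O(n log n)).


-- ===== PORT A =====
-- Python's 'for i in pushes_list' over the list being mutated in place: iteration reads the
-- element at the current index from the CURRENT list (indices already written are < counter,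
-- so each read sees the original value); ported as index recursion over the same state.
def funcLoopA (l : List Int) (counter : Nat) : List Int :=
  if h : counter < l.length then
    funcLoopA (l.set counter (l[counter] + l[counter] * (counter : Int))) (counter + 1)
  else l
termination_by l.length - counter
decreasing_by simp [List.length_set]; omega

def func (buttons : Int) : List Int :=
  let pushes_list := PySem.List.sorted (PySem.List.pyRange 1 buttons) (fun x => x) true
  let final := funcLoopA pushes_list 0
  [buttons + final.sum]

-- ===== PORT B =====
def func_alt (buttons : Int) : List Int :=
  let total :=
    if buttons > 1 then PySem.Int.floordiv (buttons * buttons * buttons - buttons) 6 else 0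
  [buttons + total]

-- ===== PRECONDITION & SPEC =====
def Spec_func (buttons : Int) (out : List Int) : Prop := out = func_alt buttons
instance (buttons : Int) (out : List Int) : Decidable (Spec_func buttons out) := by unfold Spec_func; infer_instance

-- ===== CLAIM (what is proved, stated in full; the proofs are below) =====
def Claim_equal_func : Prop := ∀ (buttons : Int), Dom_func buttons → Spec_func buttons (func buttons)

-- ===== LEMMAS AND PROOFS =====

-- The loop multiplies the element at index k by (k+1), once per index (from index c up).
theorem funcLoopA_eq (l : List Int) (c : Nat) :
    funcLoopA l c = l.mapIdx (fun k x => if k < c then x else x + x * (k : Int)) := by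
  generalize hn : l.length - c = n
  induction n generalizing l c with
  | zero =>
      rw [funcLoopA]
      rw [dif_neg (by omega)]
      apply List.ext_getElem (by simp)
      intro i h1 h2
      rw [List.getElem_mapIdx, if_pos (by omega)]
  | succ n ih =>
      rw [funcLoopA]
      rw [dif_pos (by omega)]
      rw [ih _ _ (by simp; omega)]
      apply List.ext_getElem (by simp)
      intro i h1 h2
      rw [List.getElem_mapIdx, List.getElem_mapIdx]
      simp only [List.getElem_set]
      rcases Nat.lt_trichotomy i c with h | h | h
      · rw [if_pos (show i < c + 1 by omega), if_neg (show c ≠ i by omega), if_pos h]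
      · subst h
        rw [if_pos (Nat.lt_succ_self _), if_pos rfl, if_neg (Nat.lt_irrefl _)]
      · rw [if_neg (show ¬ i < c + 1 by omega), if_neg (show c ≠ i by omega),
          if_neg (show ¬ i < c by omega)]

-- The descending list [n, n-1, ..., 1].
def descList (n : Nat) : List Int := ((List.range n).map (fun k : Nat => 1 + 1 * (k : Int))).reverse

theorem descList_succ (n : Nat) :
    descList (n + 1) = (1 + 1 * (n : Int)) :: descList n := by
  simp [descList, List.range_succ]

-- sorted(range(1, n+1), reverse=True) is the descending list.
theorem sorted_rev_range (n : Nat) :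
    PySem.List.sorted ((List.range n).map (fun k : Nat => 1 + 1 * (k : Int))) (fun x => x) true
      = descList n := by
  apply PySem.List.sorted_rev_eq_of_perm_of_pairwise_gt
  · exact (List.reverse_perm _)
  · rw [descList, List.pairwise_reverse, List.pairwise_map]
    refine List.pairwise_lt_range.imp ?_
    intro a b hab
    simp only [one_mul]
    omega

-- Weighted sum of the transformed descending list, with index offset c (generalized for the induction).
theorem sum_desc (n : Nat) : ∀ c : Nat,
    6 * ((descList n).mapIdx (fun k x => if k < 0 then x else x + x * ((k + c : Nat) : Int))).sum
      = (n : Int) * (n + 1) * (3 * c + n + 2) := by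
  induction n with
  | zero => intro c; simp [descList]
  | succ n ih =>
      intro c
      rw [descList_succ, List.mapIdx_cons]
      have hfun : (fun (i : Nat) (x : Int) =>
            if i + 1 < 0 then x else x + x * ((i + 1 + c : Nat) : Int))
          = (fun (i : Nat) (x : Int) =>
            if i < 0 then x else x + x * ((i + (c + 1) : Nat) : Int)) := by
        funext i x
        simp only [if_neg (Nat.not_lt_zero _)]
        congr 2
        omega
      rw [hfun, List.sum_cons, mul_add, ih (c + 1)]
      simp only [if_neg (Nat.not_lt_zero _)]
      push_cast
      ring

theorem sum_desc0 (n : Nat) :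
    6 * ((descList n).mapIdx (fun k x => if k < 0 then x else x + x * (k : Int))).sum
      = (n : Int) * (n + 1) * (n + 2) := by
  have h := sum_desc n 0
  simp only [Nat.add_zero] at h
  rw [h]
  ring

theorem pyRange_one (b : Int) (hb : 1 < b) :
    PySem.List.pyRange 1 b = (List.range (b - 1).toNat).map (fun k : Nat => 1 + 1 * (k : Int)) := by
  rw [PySem.List.pyRange_of_pos 1 b one_pos, if_pos hb]
  have h1 : (1 - 1 + 1 - 1 : Int) = 0 := by ring
  have h2 : (b - 1 + 1 - 1 : Int) / 1 = b - 1 := by simp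
  rw [h2]

-- ===== VERDICT (by name: the statement is the Claim_ definition above) =====
theorem func_spec : Claim_equal_func := by
  intro b _
  unfold Spec_func
  simp only [func, func_alt]
  by_cases hb : 1 < b
  · set n : Nat := (b - 1).toNat with hn
    have hbn : b = (n : Int) + 1 := by omega
    rw [pyRange_one b hb, sorted_rev_range, funcLoopA_eq, if_pos hb]
    have key : PySem.Int.floordiv (b * b * b - b) 6
        = ((descList n).mapIdx (fun k x => if k < 0 then x else x + x * (k : Int))).sum := by
      rw [PySem.Int.floordiv_eq_ediv_of_pos (by norm_num)]
      have hbb : b * b * b - b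
          = 6 * ((descList n).mapIdx (fun k x => if k < 0 then x else x + x * (k : Int))).sum := by
        rw [sum_desc0 n, hbn]
        ring
      rw [hbb, Int.mul_ediv_cancel_left _ (by norm_num)]
    rw [key]
  · have hr : PySem.List.pyRange 1 b = [] := by
      rw [PySem.List.pyRange_of_pos 1 b one_pos, if_neg hb]
      simp
    rw [hr, if_neg hb]
    rw [show PySem.List.sorted ([] : List Int) (fun x => x) true = [] from rfl]
    rw [funcLoopA]
    simp
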